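-- pv_equiv track=rewrite | github.com/ASSERT-KTH/Mokav | experiments/pynguin/c4b/return-lst/generated_tests/src_288/9/src_288.py | func
-- ===== SOURCE A (Python) =====
-- def func(*args):
-- 	ret_values = []
--
-- 	n = int(args[0])
-- 	m = 0
-- 	p = 2
-- 	if (n == 1):
-- 	    ret_values.append(1)
-- 	elif (n == 2):
-- 	    ret_values.append(3)
-- 	elif (n > 2):
-- 	    for i in range((n - 2), 0, (- 1)):
-- 	        m += ((i * p) + 1)
-- 	        p += 1
-- 	    ret_values.append(((n + m) + 1))
--
-- 	return ret_values
-- ===== SOURCE B (Python) =====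
-- def func(*args):
--     # Closed form: the loop sum telescopes to the cubic (n^3 + 5n)/6 whenever the loop branch runs;
--     # the same polynomial also yields the two hard-coded small answers.
--     n = int(args[0])
--     if n >= 1:
--         return [(n * n * n + 5 * n) // 6]
--     return []
-- ===== Notes on version B (the rewrite author's own statement) =====
-- stated objective: faster
-- what changed: Replaced the linear down-counting accumulation loop (and its two small special cases) with a single closed-form cubic polynomial evaluated with one floor division.
import Mathlib
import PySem

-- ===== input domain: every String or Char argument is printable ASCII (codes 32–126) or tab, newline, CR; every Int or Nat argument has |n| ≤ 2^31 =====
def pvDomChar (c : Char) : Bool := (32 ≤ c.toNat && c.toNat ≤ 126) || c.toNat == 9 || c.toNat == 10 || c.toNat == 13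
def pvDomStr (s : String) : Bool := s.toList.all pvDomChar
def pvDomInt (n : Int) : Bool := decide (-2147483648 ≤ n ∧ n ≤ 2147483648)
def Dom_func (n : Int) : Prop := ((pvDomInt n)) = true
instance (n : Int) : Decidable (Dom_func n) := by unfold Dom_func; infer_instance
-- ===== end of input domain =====

-- B replaces A's O(n) accumulation loop with the closed-form cubic (n^3+5n)//6 (objective: faster).

-- ===== PORT A =====
-- literal port: accumulator loop for i in range(n-2, 0, -1): m += i*p+1; p += 1
def func (n : Int) : List Int :=
  if n = 1 then [1]
  else if n = 2 then [3]
  else if n > 2 then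
    let st := (PySem.List.pyRange (n - 2) 0 (-1)).foldl
      (fun (mp : Int × Int) i => (mp.1 + (i * mp.2 + 1), mp.2 + 1)) (0, 2)
    [(n + st.1) + 1]
  else []

-- ===== PORT B =====
def func_alt (n : Int) : List Int :=
  if n ≥ 1 then [PySem.Int.floordiv (n * n * n + 5 * n) 6] else []

-- ===== PRECONDITION & SPEC =====
def Spec_func (n : Int) (out : List Int) : Prop := out = func_alt n
instance (n : Int) (out : List Int) : Decidable (Spec_func n out) := by unfold Spec_func; infer_instance

-- ===== CLAIM (what is proved, stated in full; the proofs are below) =====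
def Claim_equal_func : Prop := ∀ (n : Int), Dom_func n → Spec_func n (func n)

-- ===== LEMMAS AND PROOFS =====

-- invariant of A's loop: closed form (times 6) of the first state component
lemma loop_closed (k : Nat) : ∀ (m p : Int),
    (((PySem.List.pyRange (k : Int) 0 (-1)).foldl
        (fun (mp : Int × Int) i => (mp.1 + (i * mp.2 + 1), mp.2 + 1)) (m, p)).1) * 6
      = 6 * m + 3 * (p + k) * k * (k + 1) - k * (k + 1) * (2 * k + 1) + 6 * k := by
  induction k with
  | zero =>
    intro m p
    rw [PySem.List.pyRange_neg_one_eq_nil (by norm_num)]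
    simp; ring
  | succ k ih =>
    intro m p
    rw [PySem.List.pyRange_neg_one_cons (by positivity)]
    simp only [List.foldl_cons]
    have h := ih (m + ((k + 1 : Int) * p + 1)) (p + 1)
    push_cast at h ⊢
    have hs : ((k : Int) + 1 - 1) = (k : Int) := by ring
    rw [hs, h]; ring

lemma six_div (y : Int) : PySem.Int.floordiv (6 * y) 6 = y := by
  rw [PySem.Int.floordiv_eq_ediv_of_pos (by norm_num)]
  exact Int.mul_ediv_cancel_left y (by norm_num)

-- ===== VERDICT (by name: the statement is the Claim_ definition above) =====
theorem func_spec : Claim_equal_func := by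
  intro n _
  unfold Spec_func func func_alt
  by_cases h1 : n = 1
  · subst h1; decide
  by_cases h2 : n = 2
  · subst h2; decide
  by_cases h3 : n > 2
  · rw [if_neg h1, if_neg h2, if_pos h3, if_pos (by omega : n ≥ 1)]
    have hk : ((n - 2).toNat : Int) = n - 2 := Int.toNat_of_nonneg (by omega)
    have h := loop_closed (n - 2).toNat 0 2
    rw [hk] at h
    have hval : (n + ((PySem.List.pyRange (n - 2) 0 (-1)).foldl
        (fun (mp : Int × Int) i => (mp.1 + (i * mp.2 + 1), mp.2 + 1)) (0, 2)).1) + 1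
        = PySem.Int.floordiv (n * n * n + 5 * n) 6 := by
      have h6 : n * n * n + 5 * n
          = 6 * ((n + ((PySem.List.pyRange (n - 2) 0 (-1)).foldl
              (fun (mp : Int × Int) i => (mp.1 + (i * mp.2 + 1), mp.2 + 1)) (0, 2)).1) + 1) := by
        nlinarith [h]
      rw [h6, six_div]
    show [n + _ + 1] = _
    rw [hval]
  · rw [if_neg h1, if_neg h2, if_neg h3, if_neg (by omega : ¬ n ≥ 1)]
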